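-- pv_equiv track=rewrite | github.com/minu0508/Algorithm | Python/Programmers/Level_1/문자열 내 p와 y의 개수.py | solution
-- ===== SOURCE A (Python) =====
-- def solution(s):
--     s = list(map(str, s))
--
--     Y = 0
--     P = 0
--
--     for i in s:
--         if (i == 'p' or i == 'P'):
--             Y += 1
--         elif (i == 'y' or i == 'Y'):
--             P += 1
--     if (Y == P):
--         return True
--     else:
--         return False
-- ===== SOURCE B (Python) =====
-- def solution(s):
--     def bal(t):
--         if not t:
--             return 0
--         if len(t) == 1:
--             c = str(t[0])
--             return 1 if c in ('p', 'P') else -1 if c in ('y', 'Y') else 0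
--         m = len(t) // 2
--         return bal(t[:m]) + bal(t[m:])
--     return bal(list(s)) == 0
-- ===== Notes on version B (the rewrite author's own statement) =====
-- stated objective: alternative
-- what changed: Replaces the linear two-counter loop with a divide-and-conquer signed balance: each element weighs +1 (p/P), -1 (y/Y) or 0, halves are summed recursively, and the total is compared with zero.
import Mathlib
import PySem

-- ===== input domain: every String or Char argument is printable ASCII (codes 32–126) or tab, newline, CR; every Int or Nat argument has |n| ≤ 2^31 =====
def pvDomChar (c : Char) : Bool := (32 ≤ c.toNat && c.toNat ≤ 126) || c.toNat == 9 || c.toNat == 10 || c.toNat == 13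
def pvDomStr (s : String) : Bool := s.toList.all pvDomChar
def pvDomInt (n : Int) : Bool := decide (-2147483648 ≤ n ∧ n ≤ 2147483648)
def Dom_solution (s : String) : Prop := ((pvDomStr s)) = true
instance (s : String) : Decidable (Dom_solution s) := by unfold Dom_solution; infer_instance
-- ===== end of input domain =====

-- B replaces A's linear two-counter loop by a divide-and-conquer signed balance (+1 per p/P, -1 per y/Y) compared with zero (alternative decomposition, same cost).

-- ===== PORT A =====
-- A's loop: per character, bump Y on 'p'/'P', else bump P on 'y'/'Y'
def solutionLoop (cs : List Char) (Y P : Int) : Int × Int :=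
  match cs with
  | [] => (Y, P)
  | i :: rest =>
    if i == 'p' || i == 'P' then solutionLoop rest (Y + 1) P
    else if i == 'y' || i == 'Y' then solutionLoop rest Y (P + 1)
    else solutionLoop rest Y P

def solution (s : String) : Bool :=
  let yp := solutionLoop s.toList 0 0
  if yp.1 == yp.2 then true else false

-- ===== PORT B =====
-- bal t: divide-and-conquer signed balance of B's inner helper
def bal (t : List Char) : Int :=
  match t with
  | [] => 0
  | [c] => if c == 'p' || c == 'P' then 1 else if c == 'y' || c == 'Y' then -1 else 0
  | a :: b :: rest =>
    let m := (a :: b :: rest).length / 2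
    bal ((a :: b :: rest).take m) + bal ((a :: b :: rest).drop m)
termination_by t.length
decreasing_by
  · simp [List.length_take]; omega
  · simp; omega

def solution_alt (s : String) : Bool := bal s.toList == 0

-- ===== PRECONDITION & SPEC =====
def Spec_solution (s : String) (out : Bool) : Prop := out = solution_alt s
instance (s : String) (out : Bool) : Decidable (Spec_solution s out) := by unfold Spec_solution; infer_instance

-- ===== CLAIM (what is proved, stated in full; the proofs are below) =====
def Claim_equal_solution : Prop := ∀ (s : String), Dom_solution s → Spec_solution s (solution s)

-- ===== LEMMAS AND PROOFS =====
-- per-character weight: +1 for p/P, -1 for y/Y, 0 otherwise, as count difference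
def wgt (c : Char) : Int :=
  if c == 'p' || c == 'P' then 1 else if c == 'y' || c == 'Y' then -1 else 0

-- the loop computes (Y + Σ positive weights, P + Σ negative weights); we relate it to wgt sums
lemma solutionLoop_eq (cs : List Char) (Y P : Int) :
    (solutionLoop cs Y P).1 - (solutionLoop cs Y P).2 = Y - P + (cs.map wgt).sum := by
  induction cs generalizing Y P with
  | nil => simp [solutionLoop]
  | cons i rest ih =>
    by_cases hp : (i == 'p' || i == 'P') = true
    · simp [solutionLoop, hp, ih, wgt]; ring
    · by_cases hy : (i == 'y' || i == 'Y') = true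
      · simp [solutionLoop, hp, hy, ih, wgt]; ring
      · simp [solutionLoop, hp, hy, ih, wgt]

lemma bal_eq_aux (n : Nat) : ∀ t : List Char, t.length ≤ n → bal t = (t.map wgt).sum := by
  induction n with
  | zero =>
    intro t ht
    have : t = [] := List.eq_nil_of_length_eq_zero (Nat.le_zero.mp ht)
    simp [this, bal]
  | succ n ih =>
    intro t ht
    match t with
    | [] => simp [bal]
    | [c] => simp [bal, wgt]
    | a :: b :: rest =>
      rw [bal]
      have hlen : (a :: b :: rest).length = rest.length + 2 := by simp
      have h1 : ((a :: b :: rest).take ((a :: b :: rest).length / 2)).length ≤ n := by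
        simp [List.length_take]; omega
      have h2 : ((a :: b :: rest).drop ((a :: b :: rest).length / 2)).length ≤ n := by
        simp only [List.length_drop]
        simp at ht ⊢
        omega
      rw [ih _ h1, ih _ h2]
      rw [← List.sum_append, ← List.map_append, List.take_append_drop]

lemma bal_eq (t : List Char) : bal t = (t.map wgt).sum :=
  bal_eq_aux t.length t (le_refl _)

-- ===== VERDICT (by name: the statement is the Claim_ definition above) =====
theorem solution_spec : Claim_equal_solution := by
  intro s _
  unfold Spec_solution solution solution_alt
  have h := solutionLoop_eq s.toList 0 0
  rw [bal_eq]
  by_cases he : (solutionLoop s.toList 0 0).1 = (solutionLoop s.toList 0 0).2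
  · have hz : (s.toList.map wgt).sum = 0 := by omega
    simp [he, hz]
  · have hz : (s.toList.map wgt).sum ≠ 0 := by omega
    simp [he, hz]
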